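-- pv_equiv track=rewrite | github.com/injection-attack/numberpyramid | app.py | generate_pyramid
-- ===== SOURCE A (Python) =====
-- def generate_pyramid(num_rows):
--     pyramid = []
--     for i in range(1, num_rows + 1):
--         row = ' ' * (num_rows - i)
--         for j in range(1, 2 * i):
--             row += str(j)
--         row += ' ' * (num_rows - i)
--         pyramid.append(row)
--     return pyramid
-- ===== SOURCE B (Python) =====
-- def generate_pyramid(num_rows):
--     pyramid = []
--     nums = ''
--     k = 1
--     for i in range(1, num_rows + 1):
--         while k < 2 * i:
--             nums += str(k)
--             k += 1
--         pad = ' ' * (num_rows - i)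
--         pyramid.append(pad + nums + pad)
--     return pyramid
-- ===== Notes on version B (the rewrite author's own statement) =====
-- stated objective: faster
-- what changed: B keeps one running string of concatenated numbers and a counter across rows, extending it by the two new numbers per row, instead of rebuilding every row's digit string from scratch with an inner loop.
import Mathlib
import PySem

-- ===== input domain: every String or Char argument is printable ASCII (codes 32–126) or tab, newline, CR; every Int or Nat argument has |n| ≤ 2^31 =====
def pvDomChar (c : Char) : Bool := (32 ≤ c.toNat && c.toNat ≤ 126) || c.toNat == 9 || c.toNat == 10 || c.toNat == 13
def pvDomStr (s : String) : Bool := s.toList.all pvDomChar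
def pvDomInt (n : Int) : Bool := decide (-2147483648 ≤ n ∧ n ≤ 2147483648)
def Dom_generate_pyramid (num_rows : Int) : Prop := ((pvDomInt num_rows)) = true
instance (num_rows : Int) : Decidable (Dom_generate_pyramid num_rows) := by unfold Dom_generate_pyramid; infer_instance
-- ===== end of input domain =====

-- B replaces A's per-row inner digit-rebuilding loop by one string of concatenated
-- numbers grown incrementally across rows (objective: faster, constant-factor).

-- ===== PORT A =====
-- strings are handled on the List Char side (PySem convention); ' ' * n is exact
-- as List.replicate n.toNat ' ' (Python yields '' for n ≤ 0, as does toNat-clamping)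
def pyA_row (num_rows i : Int) : List Char :=
  let row := List.replicate (num_rows - i).toNat ' '
  let row := (PySem.List.pyRange 1 (2 * i) 1).foldl
    (fun r j => r ++ PySem.Int.toChars j) row
  row ++ List.replicate (num_rows - i).toNat ' '

def generate_pyramid (num_rows : Int) : List String :=
  (PySem.List.pyRange 1 (num_rows + 1) 1).foldl
    (fun pyramid i => pyramid ++ [String.ofList (pyA_row num_rows i)]) []

-- ===== PORT B =====
-- the 'while k < 2*i: nums += str(k); k += 1' loop of Source B
def pyB_grow (nums : List Char) (k target : Int) : List Char × Int :=
  if _h : k < target then pyB_grow (nums ++ PySem.Int.toChars k) (k + 1) target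
  else (nums, k)
termination_by (target - k).toNat
decreasing_by omega

def pyB_step (num_rows : Int) (st : List String × List Char × Int) (i : Int) :
    List String × List Char × Int :=
  let (nums, k) := pyB_grow st.2.1 st.2.2 (2 * i)
  let pad := List.replicate (num_rows - i).toNat ' '
  (st.1 ++ [String.ofList (pad ++ nums ++ pad)], nums, k)

def generate_pyramid_alt (num_rows : Int) : List String :=
  ((PySem.List.pyRange 1 (num_rows + 1) 1).foldl (pyB_step num_rows) ([], [], 1)).1

-- ===== PRECONDITION & SPEC =====
def Spec_generate_pyramid (num_rows : Int) (out : List String) : Prop := out = generate_pyramid_alt num_rows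
instance (num_rows : Int) (out : List String) : Decidable (Spec_generate_pyramid num_rows out) := by unfold Spec_generate_pyramid; infer_instance

-- ===== CLAIM (what is proved, stated in full; the proofs are below) =====
def Claim_equal_generate_pyramid : Prop := ∀ (num_rows : Int), Dom_generate_pyramid num_rows → Spec_generate_pyramid num_rows (generate_pyramid num_rows)

-- ===== LEMMAS AND PROOFS =====

-- the row A builds, in closed form
def rowSpec (num_rows i : Int) : List Char :=
  List.replicate (num_rows - i).toNat ' '
    ++ (PySem.List.pyRange 1 (2 * i) 1).flatMap PySem.Int.toChars
    ++ List.replicate (num_rows - i).toNat ' '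

theorem pyA_row_eq (num_rows i : Int) : pyA_row num_rows i = rowSpec num_rows i := by
  simp [pyA_row, rowSpec, List.flatMap_def]

theorem pyB_grow_eq (nums : List Char) (k target : Int) :
    pyB_grow nums k target
      = (nums ++ (PySem.List.pyRange k target 1).flatMap PySem.Int.toChars, max k target) := by
  fun_induction pyB_grow nums k target with
  | case1 nums k h ih =>
      rw [ih, PySem.List.pyRange_one_cons h]
      simp
      omega
  | case2 nums k h =>
      rw [PySem.List.pyRange_one_eq_nil (by omega)]
      simp
      omega

theorem altLoop_eq (nr : Int) (m : Nat) :
    (PySem.List.pyRange 1 ((m : Int) + 1) 1).foldl (pyB_step nr) ([], [], 1)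
      = ((PySem.List.pyRange 1 ((m : Int) + 1) 1).map
           (fun i => String.ofList (rowSpec nr i)),
         (PySem.List.pyRange 1 (2 * (m : Int)) 1).flatMap PySem.Int.toChars,
         max 1 (2 * (m : Int))) := by
  induction m with
  | zero =>
      push_cast
      rw [show PySem.List.pyRange 1 1 1 = [] from PySem.List.pyRange_one_eq_nil (by omega),
          show PySem.List.pyRange 1 0 1 = [] from PySem.List.pyRange_one_eq_nil (by omega)]
      simp
  | succ m ih =>
      push_cast
      have hsplit : PySem.List.pyRange 1 (((m : Nat) + 1 : Int) + 1) 1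
          = PySem.List.pyRange 1 ((m : Int) + 1) 1 ++ [(m : Int) + 1] := by
        have := PySem.List.pyRange_one_succ_right (a := 1) (b := (m : Int) + 1) (by omega)
        push_cast at this
        exact this
      rw [hsplit, List.foldl_append, List.map_append, ih]
      simp only [List.foldl_cons, List.foldl_nil]
      rw [pyB_step]
      rw [pyB_grow_eq]
      have hflat : (PySem.List.pyRange 1 (2 * (m : Int)) 1).flatMap PySem.Int.toChars
          ++ (PySem.List.pyRange (max 1 (2 * (m : Int))) (2 * ((m : Int) + 1)) 1).flatMap PySem.Int.toChars
          = (PySem.List.pyRange 1 (2 * ((m : Int) + 1)) 1).flatMap PySem.Int.toChars := by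
        rcases Nat.eq_zero_or_pos m with hm | hm
        · subst hm
          push_cast
          rw [show PySem.List.pyRange 1 0 1 = [] from PySem.List.pyRange_one_eq_nil (by omega)]
          norm_num
        · have hmax : max 1 (2 * (m : Int)) = 2 * (m : Int) := by omega
          rw [hmax, ← List.flatMap_append,
              ← PySem.List.pyRange_one_append 1 (2 * (m : Int)) (2 * ((m : Int) + 1))
                (by omega) (by omega)]
      rw [hflat]
      have hmax2 : max (max 1 (2 * (m : Int))) (2 * ((m : Int) + 1)) = max 1 (2 * ((m : Int) + 1)) := by
        omega
      rw [hmax2]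
      simp [rowSpec]

theorem ports_agree (num_rows : Int) :
    generate_pyramid num_rows = generate_pyramid_alt num_rows := by
  unfold generate_pyramid generate_pyramid_alt
  rcases (by omega : num_rows ≤ 0 ∨ 0 < num_rows) with h | h
  · rw [PySem.List.pyRange_one_eq_nil (by omega)]
    simp
  · have hm : num_rows = ((num_rows.toNat : Int)) := by omega
    rw [hm, altLoop_eq]
    rw [PySem.List.foldl_append_singleton_eq_map]
    simp [pyA_row_eq]

-- ===== VERDICT (by name: the statement is the Claim_ definition above) =====
theorem generate_pyramid_spec : Claim_equal_generate_pyramid := by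
  intro num_rows _
  unfold Spec_generate_pyramid
  exact ports_agree num_rows
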